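-- pv_equiv track=rewrite | github.com/vincent-l-j/finsight | streamlit_app.py | consolidate_words
-- ===== SOURCE A (Python) =====
-- from collections import Counter
--
-- def consolidate_words(word_list):
--     """
--     Consolidate words with different casing.
--     Keeps the word that occurs the most, with a tie-breaking preference for more capital letters.
--     """
--     # Group words by their lowercase version
--     word_groups = {}
--     for word in word_list:
--         normalized = word.lower()
--         if normalized not in word_groups:
--             word_groups[normalized] = []
--         word_groups[normalized].append(word)
--
--     # Determine the best word for each group
--     consolidated_words = {}
--     for normalized, words in word_groups.items():
--         # Count occurrences of each original word
--         word_counts = Counter(words)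
--         # Sort by frequency and then by number of uppercase letters
--         best_word = max(
--             word_counts,
--             key=lambda w: (word_counts[w], sum(1 for c in w if c.isupper())),
--         )
--         consolidated_words[best_word.lower()] = best_word
--
--     return consolidated_words
-- ===== SOURCE B (Python) =====
-- from collections import Counter
--
-- def consolidate_words(word_list):
--     """
--     Consolidate words with different casing.
--     Keeps the word that occurs the most, with a tie-breaking preference for more capital letters.
--     """
--     counts = Counter(word_list)
--     best = {}
--     for word in counts:
--         norm = word.lower()
--         key = (counts[word], sum(1 for c in word if c.isupper()))
--         if norm not in best or key > best[norm][0]: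
--             best[norm] = (key, word)
--     return {norm: entry[1] for norm, entry in best.items()}
-- ===== Notes on version B (the rewrite author's own statement) =====
-- stated objective: faster
-- what changed: B replaces A's per-lowercase-group lists plus a fresh Counter and max() per group by one global Counter over the whole list and a single strict-improvement pass over the distinct words keeping the best (count, uppercase-count) entry per lowercase form.
import Mathlib
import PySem

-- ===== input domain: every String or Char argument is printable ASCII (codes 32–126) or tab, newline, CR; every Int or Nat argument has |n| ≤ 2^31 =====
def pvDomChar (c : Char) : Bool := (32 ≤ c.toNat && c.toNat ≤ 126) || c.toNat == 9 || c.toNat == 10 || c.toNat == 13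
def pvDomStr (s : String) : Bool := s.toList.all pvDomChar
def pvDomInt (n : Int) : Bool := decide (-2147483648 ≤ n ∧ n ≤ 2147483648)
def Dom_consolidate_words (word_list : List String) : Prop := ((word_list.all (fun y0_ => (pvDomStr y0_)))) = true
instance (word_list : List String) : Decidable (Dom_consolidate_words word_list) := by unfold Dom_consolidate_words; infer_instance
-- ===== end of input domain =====

-- B replaces A's per-lowercase-group lists + per-group Counter + max by ONE global Counter and a single
-- strict-improvement pass over the distinct words (same result; measured constant-factor faster).

-- sum(1 for c in w if c.isupper())  (shared by both Pythons verbatim)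
def pvUpper (w : String) : Int := ((w.toList.countP (fun c => PySem.Chars.isupper c) : Nat) : Int)

-- ===== PORT A =====
-- body of A's grouping loop
def pvStepA (d : PySem.Dict String (List String)) (word : String) : PySem.Dict String (List String) :=
  let normalized := PySem.Str.lower word
  let d := if d.contains normalized then d else d.insert normalized []
  d.modify normalized [] (fun ws => ws ++ [word])

-- Counter(words) and max(word_counts, key=lambda w: (count, uppercase))
def pvBestA (words : List String) : Option String :=
  let word_counts := PySem.Dict.counter words
  PySem.List.max2? word_counts.keys (fun w => word_counts.getD w 0) (fun w => pvUpper w)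

def consolidate_words (word_list : List String) : List (String × String) :=
  let word_groups := word_list.foldl pvStepA PySem.Dict.empty
  let consolidated := word_groups.items.foldl (fun d p =>
      match pvBestA p.2 with
      | some best_word => d.insert (PySem.Str.lower best_word) best_word
      | none => d) PySem.Dict.empty   -- none unreachable: every group is nonempty
  consolidated.items

-- ===== PORT B =====
-- Python's '>' on the (count, uppercase) tuples: stored key strictly less than the new key
def pvKeyLt (a b : Int × Int) : Bool := decide (a.1 < b.1 ∨ (a.1 = b.1 ∧ a.2 < b.2))

-- body of B's single pass over the distinct words
def pvStepB (counts : PySem.Dict String Int) (b : PySem.Dict String ((Int × Int) × String))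
    (word : String) : PySem.Dict String ((Int × Int) × String) :=
  let norm := PySem.Str.lower word
  let key : Int × Int := (counts.getD word 0, pvUpper word)
  match b.get? norm with
  | none => b.insert norm (key, word)
  | some e => if pvKeyLt e.1 key then b.insert norm (key, word) else b

def consolidate_words_alt (word_list : List String) : List (String × String) :=
  let counts := PySem.Dict.counter word_list
  let best := counts.keys.foldl (pvStepB counts) PySem.Dict.empty
  best.items.map (fun p => (p.1, p.2.2))

-- ===== PRECONDITION & SPEC =====
def Spec_consolidate_words (word_list : List String) (out : List (String × String)) : Prop := out = consolidate_words_alt word_list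
instance (word_list : List String) (out : List (String × String)) : Decidable (Spec_consolidate_words word_list out) := by unfold Spec_consolidate_words; infer_instance

-- ===== CLAIM (what is proved, stated in full; the proofs are below) =====
def Claim_equal_consolidate_words : Prop := ∀ (word_list : List String), Dom_consolidate_words word_list → Spec_consolidate_words word_list (consolidate_words word_list)

-- ===== LEMMAS AND PROOFS =====

-- the accumulator body of B's per-norm update, on the optional stored entry
def pvOptStep (counts : PySem.Dict String Int) (acc : Option ((Int × Int) × String)) (w : String) :
    Option ((Int × Int) × String) :=
  let key : Int × Int := (counts.getD w 0, pvUpper w)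
  match acc with
  | none => some (key, w)
  | some e => if pvKeyLt e.1 key then some (key, w) else acc

-- the accumulator body of PySem.List.max2?
def pvMaxStep (k1 k2 : String → Int) (acc : Option String) (x : String) : Option String :=
  match acc with
  | none => some x
  | some m => if (decide (k1 m < k1 x) || (!decide (k1 x < k1 m) && decide (k2 m < k2 x))) then some x else some m

lemma max2?_eq_maxfold (g : List String) (k1 k2 : String → Int) :
    PySem.List.max2? g k1 k2 = g.foldl (pvMaxStep k1 k2) none := by
  unfold PySem.List.max2?
  congr 1
  funext acc x
  cases acc <;> rfl

lemma keyLt_eq (a b c d : Int) :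
    pvKeyLt (a, c) (b, d) = (decide (a < b) || (!decide (b < a) && decide (c < d))) := by
  by_cases h1 : a < b <;> by_cases h2 : b < a <;> by_cases h3 : c < d <;>
    simp [pvKeyLt, h1, h2, h3] <;> omega

lemma stepA_getD (d : PySem.Dict String (List String)) (w n : String) :
    (pvStepA d w).getD n [] = if n = PySem.Str.lower w then d.getD n [] ++ [w] else d.getD n [] := by
  unfold pvStepA
  by_cases hc : d.contains (PySem.Str.lower w) = true
  · simp only [hc, if_true, PySem.Dict.getD_modify]
    split_ifs with h
    · subst h; rfl
    · rfl
  · have hcf : d.contains (PySem.Str.lower w) = false := by simpa using hc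
    simp only [hc, if_false, Bool.false_eq_true, PySem.Dict.getD_modify, PySem.Dict.getD_insert]
    split_ifs with h
    · subst h
      simp [PySem.Dict.getD_of_not_contains d _ hcf]
    · rfl

lemma foldA_getD (l : List String) (d : PySem.Dict String (List String)) (n : String) :
    (l.foldl pvStepA d).getD n [] = d.getD n [] ++ l.filter (fun w => PySem.Str.lower w == n) := by
  induction l generalizing d with
  | nil => simp
  | cons w t ih =>
    simp only [List.foldl_cons, List.filter_cons, ih, stepA_getD]
    rcases eq_or_ne n (PySem.Str.lower w) with h | h
    · subst h
      simp
    · have hb : (PySem.Str.lower w == n) = false := by simpa [beq_iff_eq] using (Ne.symm h)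
      simp [h, hb]

lemma stepA_keys (d : PySem.Dict String (List String)) (w : String) :
    (pvStepA d w).keys = PySem.Set.add d.keys (PySem.Str.lower w) := by
  unfold pvStepA PySem.Set.add
  by_cases hc : d.contains (PySem.Str.lower w) = true
  · have hm : PySem.Set.contains d.keys (PySem.Str.lower w) = true :=
      (PySem.Set.contains_iff _ _).2 ((PySem.Dict.contains_iff_mem_keys d _).1 hc)
    simp only [hc, if_true, PySem.Dict.keys_modify, hm]
    exact PySem.Dict.keys_insert_of_contains d _ hc
  · have hcf : d.contains (PySem.Str.lower w) = false := by simpa using hc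
    have hm : PySem.Set.contains d.keys (PySem.Str.lower w) = false := by
      rcases h : PySem.Set.contains d.keys (PySem.Str.lower w) with _ | _
      · rfl
      · exact absurd ((PySem.Dict.contains_iff_mem_keys d _).2 ((PySem.Set.contains_iff _ _).1 h)) (by simp [hcf])
    simp only [hc, if_false, Bool.false_eq_true, PySem.Dict.keys_modify, hm]
    rw [PySem.Dict.keys_insert_of_contains _ _ (PySem.Dict.contains_insert_self d _ _),
        PySem.Dict.keys_insert_of_not_contains d _ hcf]

lemma foldA_keys (l : List String) (d : PySem.Dict String (List String)) :
    (l.foldl pvStepA d).keys = (l.map PySem.Str.lower).foldl PySem.Set.add d.keys := by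
  induction l generalizing d with
  | nil => simp
  | cons w t ih => simp only [List.foldl_cons, List.map_cons, ih, stepA_keys]

lemma stepB_get? (counts : PySem.Dict String Int) (b : PySem.Dict String ((Int × Int) × String))
    (w n : String) :
    (pvStepB counts b w).get? n = if n = PySem.Str.lower w then pvOptStep counts (b.get? n) w else b.get? n := by
  simp only [pvStepB, pvOptStep]
  rcases hb : b.get? (PySem.Str.lower w) with _ | e
  · simp only [PySem.Dict.get?_insert]
    split_ifs with h
    · subst h; rw [hb]
    · rfl
  · by_cases hk : pvKeyLt e.1 (counts.getD w 0, pvUpper w) = true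
    · simp only [hk, if_true, PySem.Dict.get?_insert]
      split_ifs with h
      · subst h; rw [hb]; simp [hk]
      · rfl
    · simp only [hk, Bool.false_eq_true, if_false]
      split_ifs with h
      · subst h; rw [hb]; simp [hk]
      · rfl

lemma foldB_get? (counts : PySem.Dict String Int) (l : List String)
    (b : PySem.Dict String ((Int × Int) × String)) (n : String) :
    (l.foldl (pvStepB counts) b).get? n
      = (l.filter (fun w => PySem.Str.lower w == n)).foldl (pvOptStep counts) (b.get? n) := by
  induction l generalizing b with
  | nil => simp
  | cons w t ih =>
    simp only [List.foldl_cons, List.filter_cons, ih, stepB_get?]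
    rcases eq_or_ne n (PySem.Str.lower w) with h | h
    · subst h; simp
    · have hb : (PySem.Str.lower w == n) = false := by simpa [beq_iff_eq] using (Ne.symm h)
      simp [h, hb]

lemma stepB_keys (counts : PySem.Dict String Int) (b : PySem.Dict String ((Int × Int) × String))
    (w : String) :
    (pvStepB counts b w).keys = PySem.Set.add b.keys (PySem.Str.lower w) := by
  simp only [pvStepB, PySem.Set.add]
  rcases hb : b.get? (PySem.Str.lower w) with _ | e
  · have hcf : b.contains (PySem.Str.lower w) = false := by
      rw [PySem.Dict.contains_eq_isSome_get?, hb]; rfl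
    have hm : PySem.Set.contains b.keys (PySem.Str.lower w) = false := by
      rcases h : PySem.Set.contains b.keys (PySem.Str.lower w) with _ | _
      · rfl
      · exact absurd ((PySem.Dict.contains_iff_mem_keys b _).2 ((PySem.Set.contains_iff _ _).1 h)) (by simp [hcf])
    rw [PySem.Dict.keys_insert_of_not_contains b _ hcf, hm]
    simp
  · have hct : b.contains (PySem.Str.lower w) = true := by
      rw [PySem.Dict.contains_eq_isSome_get?, hb]; rfl
    have hm : PySem.Set.contains b.keys (PySem.Str.lower w) = true :=
      (PySem.Set.contains_iff _ _).2 ((PySem.Dict.contains_iff_mem_keys b _).1 hct)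
    rw [hm]
    simp only [if_true]
    by_cases hk : pvKeyLt e.1 (counts.getD w 0, pvUpper w) = true
    · simp only [hk, if_true]
      exact PySem.Dict.keys_insert_of_contains b _ hct
    · simp [hk]

lemma foldB_keys (counts : PySem.Dict String Int) (l : List String)
    (b : PySem.Dict String ((Int × Int) × String)) :
    (l.foldl (pvStepB counts) b).keys = (l.map PySem.Str.lower).foldl PySem.Set.add b.keys := by
  induction l generalizing b with
  | nil => simp
  | cons w t ih => simp only [List.foldl_cons, List.map_cons, ih, stepB_keys]

-- B's option fold over a group IS max2?'s fold carrying the key along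
lemma optFold_eq (counts : PySem.Dict String Int) (g : List String) (acc : Option String) :
    g.foldl (pvOptStep counts) (acc.map (fun m => ((counts.getD m 0, pvUpper m), m)))
      = (g.foldl (pvMaxStep (fun w => counts.getD w 0) (fun w => pvUpper w)) acc).map
          (fun m => ((counts.getD m 0, pvUpper m), m)) := by
  induction g generalizing acc with
  | nil => simp
  | cons x t ih =>
    have hstep : pvOptStep counts (acc.map (fun m => ((counts.getD m 0, pvUpper m), m))) x
        = (pvMaxStep (fun w => counts.getD w 0) (fun w => pvUpper w) acc x).map
            (fun m => ((counts.getD m 0, pvUpper m), m)) := by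
      cases acc with
      | none => rfl
      | some m =>
        simp only [Option.map_some, pvOptStep, pvMaxStep, keyLt_eq]
        split_ifs <;> rfl
    simp only [List.foldl_cons, hstep, ih]

lemma pvMaxStep_mem (k1 k2 : String → Int) (acc : Option String) (x m : String)
    (h : pvMaxStep k1 k2 acc x = some m) : m = x ∨ acc = some m := by
  cases acc with
  | none => left; simpa [pvMaxStep] using h.symm
  | some m' =>
    simp only [pvMaxStep] at h
    split_ifs at h
    · left; exact (Option.some_inj.1 h).symm
    · right; rw [Option.some_inj.1 h]

lemma maxfold_congr (k1 k1' k2 : String → Int) (S : List String) (h : ∀ x ∈ S, k1 x = k1' x) :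
    ∀ (g : List String), (∀ x ∈ g, x ∈ S) → ∀ (acc : Option String), (∀ m, acc = some m → m ∈ S) →
    g.foldl (pvMaxStep k1 k2) acc = g.foldl (pvMaxStep k1' k2) acc := by
  intro g
  induction g with
  | nil => intro _ _ _; rfl
  | cons x t ih =>
    intro hg acc hacc
    have hx : x ∈ S := hg x (by simp)
    have hstep : pvMaxStep k1 k2 acc x = pvMaxStep k1' k2 acc x := by
      cases acc with
      | none => rfl
      | some m => simp only [pvMaxStep, h m (hacc m rfl), h x hx]
    have hacc' : ∀ m, pvMaxStep k1' k2 acc x = some m → m ∈ S := by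
      intro m hm
      rcases pvMaxStep_mem k1' k2 acc x m hm with h1 | h1
      · exact h1 ▸ hx
      · exact hacc m h1
    simp only [List.foldl_cons, hstep]
    exact ih (fun y hy => hg y (by simp [hy])) _ hacc'

lemma maxfold_mem (k1 k2 : String → Int) (S : List String) :
    ∀ (g : List String), (∀ x ∈ g, x ∈ S) → ∀ (acc : Option String), (∀ m, acc = some m → m ∈ S) →
    ∀ m, g.foldl (pvMaxStep k1 k2) acc = some m → m ∈ S := by
  intro g
  induction g with
  | nil => intro _ acc hacc m hm; exact hacc m hm
  | cons x t ih =>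
    intro hg acc hacc m hm
    refine ih (fun y hy => hg y (by simp [hy])) _ ?_ m hm
    intro m' hm'
    rcases pvMaxStep_mem k1 k2 acc x m' hm' with h1 | h1
    · exact h1 ▸ hg x (by simp)
    · exact hacc m' h1

lemma maxfold_isSome (k1 k2 : String → Int) :
    ∀ (g : List String) (m : String), ∃ m', g.foldl (pvMaxStep k1 k2) (some m) = some m' := by
  intro g
  induction g with
  | nil => intro m; exact ⟨m, rfl⟩
  | cons x t ih =>
    intro m
    simp only [List.foldl_cons, pvMaxStep]
    split_ifs
    · exact ih x
    · exact ih m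

lemma ofList_append_singleton (xs : List String) (x : String) :
    PySem.Set.ofList (xs ++ [x]) = PySem.Set.add (PySem.Set.ofList xs) x := by
  simp [PySem.Set.ofList, List.foldl_append]

lemma ofList_filter (p : String → Bool) (xs : List String) :
    (PySem.Set.ofList xs).filter p = PySem.Set.ofList (xs.filter p) := by
  induction xs using List.reverseRecOn with
  | nil => rfl
  | append_singleton xs x ih =>
    rw [ofList_append_singleton, List.filter_append]
    by_cases hx : x ∈ xs
    · rw [PySem.Set.add_of_mem ((PySem.Set.mem_ofList xs x).2 hx), ih]
      by_cases hp : p x = true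
      · rw [show List.filter p [x] = [x] by simp [hp], ofList_append_singleton,
          PySem.Set.add_of_mem ((PySem.Set.mem_ofList _ x).2 (List.mem_filter.2 ⟨hx, hp⟩))]
      · simp [List.filter, hp]
    · rw [PySem.Set.add_of_not_mem (fun h => hx ((PySem.Set.mem_ofList xs x).1 h)),
        List.filter_append, ih]
      by_cases hp : p x = true
      · rw [show List.filter p [x] = [x] by simp [hp], ofList_append_singleton,
          PySem.Set.add_of_not_mem
            (fun h => hx (List.mem_filter.1 ((PySem.Set.mem_ofList _ x).1 h)).1)]
      · simp [List.filter, hp]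

lemma ofList_map_ofList (f : String → String) (xs : List String) :
    PySem.Set.ofList ((PySem.Set.ofList xs).map f) = PySem.Set.ofList (xs.map f) := by
  induction xs using List.reverseRecOn with
  | nil => rfl
  | append_singleton xs x ih =>
    have hr : PySem.Set.ofList ((xs ++ [x]).map f) = PySem.Set.add (PySem.Set.ofList (xs.map f)) (f x) := by
      rw [List.map_append]
      exact ofList_append_singleton _ _
    rw [ofList_append_singleton, hr]
    by_cases hx : x ∈ xs
    · rw [PySem.Set.add_of_mem ((PySem.Set.mem_ofList xs x).2 hx), ih,
        PySem.Set.add_of_mem ((PySem.Set.mem_ofList _ (f x)).2 (List.mem_map_of_mem hx))]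
    · rw [PySem.Set.add_of_not_mem (fun h => hx ((PySem.Set.mem_ofList xs x).1 h)), List.map_append]
      have h2 : PySem.Set.ofList (List.map f (PySem.Set.ofList xs) ++ List.map f [x])
          = PySem.Set.add (PySem.Set.ofList (List.map f (PySem.Set.ofList xs))) (f x) := by
        simpa using ofList_append_singleton (List.map f (PySem.Set.ofList xs)) (f x)
      rw [h2, ih]

-- for each represented lowercase form n: A's group max exists, lowers back to n, and equals
-- the value of B's strict-improvement fold over the distinct words of the group
lemma per_norm (l : List String) (n : String)
    (hn : n ∈ PySem.Set.ofList (l.map PySem.Str.lower)) :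
    ∃ b, pvBestA (l.filter (fun w => PySem.Str.lower w == n)) = some b ∧ PySem.Str.lower b = n ∧
      ((PySem.Set.ofList l).filter (fun w => PySem.Str.lower w == n)).foldl
          (pvOptStep (PySem.Dict.counter l)) none
        = some (((PySem.Dict.counter l).getD b 0, pvUpper b), b) := by
  have hmemlow : ∀ x, x ∈ l.filter (fun w => PySem.Str.lower w == n) → PySem.Str.lower x = n := by
    intro x hx
    exact beq_iff_eq.1 (List.mem_filter.1 hx).2
  have hGmem : ∀ x, x ∈ PySem.Set.ofList (l.filter (fun w => PySem.Str.lower w == n)) →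
      x ∈ l.filter (fun w => PySem.Str.lower w == n) := fun x hx => (PySem.Set.mem_ofList _ x).1 hx
  -- the group is represented
  obtain ⟨w, hwl, hwn⟩ := List.mem_map.1 ((PySem.Set.mem_ofList _ n).1 hn)
  have hwG : w ∈ PySem.Set.ofList (l.filter (fun w => PySem.Str.lower w == n)) :=
    (PySem.Set.mem_ofList _ w).2 (List.mem_filter.2 ⟨hwl, beq_iff_eq.2 hwn⟩)
  -- the two key functions agree on the group
  have hk1 : ∀ x ∈ PySem.Set.ofList (l.filter (fun w => PySem.Str.lower w == n)),
      (PySem.Dict.counter (l.filter (fun w => PySem.Str.lower w == n))).getD x 0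
        = (PySem.Dict.counter l).getD x 0 := by
    intro x hx
    rw [PySem.Dict.getD_counter, PySem.Dict.getD_counter,
      List.count_filter (by exact beq_iff_eq.2 (hmemlow x (hGmem x hx)))]
  -- A's max as the fold with the global counts as first key
  have hA : pvBestA (l.filter (fun w => PySem.Str.lower w == n))
      = (PySem.Set.ofList (l.filter (fun w => PySem.Str.lower w == n))).foldl
          (pvMaxStep (fun w => (PySem.Dict.counter l).getD w 0) (fun w => pvUpper w)) none := by
    simp only [pvBestA]
    rw [PySem.Dict.keys_counter, max2?_eq_maxfold]
    exact maxfold_congr _ _ _ _ hk1 _ (fun x hx => hx) none (fun m hm => by cases hm)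
  -- the fold returns some b in the group
  rcases hG : PySem.Set.ofList (l.filter (fun w => PySem.Str.lower w == n)) with _ | ⟨x, t⟩
  · rw [hG] at hwG; cases hwG
  obtain ⟨b, hb⟩ := maxfold_isSome (fun w => (PySem.Dict.counter l).getD w 0) (fun w => pvUpper w) t x
  have hfold : (PySem.Set.ofList (l.filter (fun w => PySem.Str.lower w == n))).foldl
      (pvMaxStep (fun w => (PySem.Dict.counter l).getD w 0) (fun w => pvUpper w)) none = some b := by
    rw [hG]; simpa [pvMaxStep] using hb
  have hbG : b ∈ PySem.Set.ofList (l.filter (fun w => PySem.Str.lower w == n)) := by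
    refine maxfold_mem _ _ (PySem.Set.ofList (l.filter (fun w => PySem.Str.lower w == n)))
      _ ?_ none (fun m hm => by cases hm) b hfold
    intro y hy; exact hy
  refine ⟨b, hA.trans hfold, hmemlow b (hGmem b hbG), ?_⟩
  -- B's option fold over the same group
  rw [ofList_filter]
  have h2 := optFold_eq (PySem.Dict.counter l)
    (PySem.Set.ofList (l.filter (fun w => PySem.Str.lower w == n))) none
  rw [hfold] at h2
  exact h2

-- ===== VERDICT (by name: the statement is the Claim_ definition above) =====
theorem consolidate_words_spec : Claim_equal_consolidate_words := by
  intro l _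
  unfold Spec_consolidate_words consolidate_words consolidate_words_alt
  simp only []
  -- A's grouping dict
  have hkeys : (l.foldl pvStepA PySem.Dict.empty).keys = PySem.Set.ofList (l.map PySem.Str.lower) := by
    rw [foldA_keys, PySem.Dict.keys_empty]; rfl
  have hnd : (l.foldl pvStepA PySem.Dict.empty).keys.Nodup := by
    rw [hkeys]; exact PySem.Set.nodup_ofList _
  have hgetD : ∀ n, (l.foldl pvStepA PySem.Dict.empty).getD n []
      = l.filter (fun w => PySem.Str.lower w == n) := by
    intro n; rw [foldA_getD, PySem.Dict.getD_empty]; rfl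
  have hitems : (l.foldl pvStepA PySem.Dict.empty).items
      = (PySem.Set.ofList (l.map PySem.Str.lower)).map
          (fun n => (n, l.filter (fun w => PySem.Str.lower w == n))) := by
    rw [PySem.Dict.items_eq_map_keys _ hnd [], hkeys]
    exact List.map_congr_left (fun n _ => by rw [hgetD])
  rw [hitems, List.foldl_map]
  -- A's second loop inserts exactly (n, best of group n), all keys fresh and distinct
  have hstep2 : ∀ (d : PySem.Dict String String), ∀ n ∈ PySem.Set.ofList (l.map PySem.Str.lower),
      (match pvBestA (l.filter (fun w => PySem.Str.lower w == n)) with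
        | some best_word => d.insert (PySem.Str.lower best_word) best_word
        | none => d)
      = d.insert n ((pvBestA (l.filter (fun w => PySem.Str.lower w == n))).getD "") := by
    intro d n hn
    obtain ⟨b, hsome, hlow, _⟩ := per_norm l n hn
    rw [hsome]
    show d.insert (PySem.Str.lower b) b = d.insert n ((some b).getD "")
    rw [hlow]
    rfl
  rw [PySem.List.foldl_congr_mem _ _ _ _ hstep2]
  rw [PySem.Dict.items_foldl_insert_fresh _ (fun n => n)
      (fun n => (pvBestA (l.filter (fun w => PySem.Str.lower w == n))).getD "") _
      (fun a _ => PySem.Dict.contains_empty a)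
      (by simp only [List.map_id_fun', id]; exact PySem.Set.nodup_ofList (l.map PySem.Str.lower))]
  -- B's dict
  have hBkeys : ((PySem.Dict.counter l).keys.foldl (pvStepB (PySem.Dict.counter l))
      PySem.Dict.empty).keys = PySem.Set.ofList (l.map PySem.Str.lower) := by
    rw [foldB_keys, PySem.Dict.keys_empty, PySem.Dict.keys_counter]
    exact ofList_map_ofList _ _
  have hBnd : ((PySem.Dict.counter l).keys.foldl (pvStepB (PySem.Dict.counter l))
      PySem.Dict.empty).keys.Nodup := by
    rw [hBkeys]; exact PySem.Set.nodup_ofList _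
  rw [PySem.Dict.items_eq_map_keys _ hBnd ((0, 0), ""), hBkeys, List.map_map]
  -- pointwise agreement over the represented lowercase forms
  refine (List.map_congr_left ?_).symm
  intro n hn
  obtain ⟨b, hsome, _, hoptfold⟩ := per_norm l n hn
  have hget : ((PySem.Dict.counter l).keys.foldl (pvStepB (PySem.Dict.counter l))
      PySem.Dict.empty).get? n = some (((PySem.Dict.counter l).getD b 0, pvUpper b), b) := by
    rw [foldB_get?, PySem.Dict.get?_empty, PySem.Dict.keys_counter]
    exact hoptfold
  simp only [Function.comp, PySem.Dict.getD_eq_get?_getD, hget, Option.getD_some, hsome]
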